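-- pv_equiv track=rewrite | github.com/TherionAcribus/GeoApp | plugins/official/multitap_code/main.py | _split_greedy_fallback
-- ===== SOURCE A (Python) =====
-- from typing import Any, Dict, List, Optional, Tuple
--
-- def _split_greedy_fallback(text: str) -> List[str]:
--     groups: List[str] = []
--     i = 0
--     while i < len(text):
--         digit = text[i]
--         if digit not in "0123456789":
--             groups.append(digit)
--             i += 1
--             continue
--
--         run_length = 1
--         while i + run_length < len(text) and text[i + run_length] == digit:
--             run_length += 1
--
--         remaining = run_length
--         while remaining > 0:
--             length = min(remaining, 4)
--             groups.append(digit * length)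
--             remaining -= length
--
--         i += run_length
--
--     return groups
-- ===== SOURCE B (Python) =====
-- from typing import List
--
-- def _split_greedy_fallback(text: str) -> List[str]:
--     # Single streaming pass: extend the last open digit chunk (if it matches
--     # and has room), otherwise start a new group. No run lengths computed.
--     groups: List[str] = []
--     for ch in text:
--         if groups and '0' <= ch <= '9' and groups[-1][-1] == ch and len(groups[-1]) < 4:
--             groups[-1] += ch
--         else:
--             groups.append(ch)
--     return groups
-- ===== Notes on version B (the rewrite author's own statement) =====
-- stated objective: simpler
-- what changed: Replaced A's index-driven scan with nested run-counting and chunk-emitting while-loops by a single streaming pass that never computes run lengths: each character either extends the last open digit chunk (same digit, length < 4) or starts a new group.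
import Mathlib
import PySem

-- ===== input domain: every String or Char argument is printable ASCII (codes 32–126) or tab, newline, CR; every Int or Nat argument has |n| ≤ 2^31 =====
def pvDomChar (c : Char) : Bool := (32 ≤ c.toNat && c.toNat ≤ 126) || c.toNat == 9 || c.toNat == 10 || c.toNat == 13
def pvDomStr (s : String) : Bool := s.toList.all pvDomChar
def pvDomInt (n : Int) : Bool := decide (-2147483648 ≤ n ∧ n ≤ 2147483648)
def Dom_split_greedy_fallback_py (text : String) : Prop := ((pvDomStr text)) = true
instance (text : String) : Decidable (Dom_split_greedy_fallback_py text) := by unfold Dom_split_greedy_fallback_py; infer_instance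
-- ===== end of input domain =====

-- B replaces A's nested while-loops (run counting + chunk emission) by one streaming pass that
-- extends the last open digit chunk or starts a new group; objective: simpler.

-- ===== PORT A =====
-- inner while: counts how many further chars equal `digit`
def pvRunA (digit : Char) : List Char → Nat
  | [] => 0
  | c :: rest => if c == digit then pvRunA digit rest + 1 else 0

-- inner while: emit digit*min(remaining,4) until remaining = 0
def pvChunkLoopA (digit : Char) (remaining : Nat) : List String :=
  if _h : 0 < remaining then
    String.ofList (List.replicate (min remaining 4) digit) :: pvChunkLoopA digit (remaining - min remaining 4)
  else []
  termination_by remaining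
  decreasing_by omega

-- outer while over the suffix of the text starting at i
def pvGoA : List Char → List String
  | [] => []
  | digit :: rest =>
    if !("0123456789".toList.contains digit) then
      String.ofList [digit] :: pvGoA rest
    else
      let run := pvRunA digit rest + 1
      pvChunkLoopA digit run ++ pvGoA (rest.drop (run - 1))
  termination_by l => l.length
  decreasing_by all_goals simp [List.length_drop]

def split_greedy_fallback_py (text : String) : List String := pvGoA text.toList

-- ===== PORT B =====
-- one step of B's streaming loop; groups kept newest-first (Python appends/mutates at the end)
def pvStepB (acc : List (List Char)) (ch : Char) : List (List Char) :=
  match acc with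
  | g :: gs =>
    if decide ('0' ≤ ch ∧ ch ≤ '9') && (g.getLast? == some ch) && decide (g.length < 4) then
      (g ++ [ch]) :: gs
    else
      [ch] :: g :: gs
  | [] => [[ch]]

def split_greedy_fallback_py_alt (text : String) : List String :=
  ((text.toList.foldl pvStepB []).reverse).map String.ofList

-- ===== PRECONDITION & SPEC =====
def Spec_split_greedy_fallback_py (text : String) (out : List String) : Prop := out = split_greedy_fallback_py_alt text
instance (text : String) (out : List String) : Decidable (Spec_split_greedy_fallback_py text out) := by unfold Spec_split_greedy_fallback_py; infer_instance

-- ===== CLAIM (what is proved, stated in full; the proofs are below) =====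
def Claim_equal_split_greedy_fallback_py : Prop := ∀ (text : String), Dom_split_greedy_fallback_py text → Spec_split_greedy_fallback_py text (split_greedy_fallback_py text)

-- ===== LEMMAS AND PROOFS =====

-- char-list level chunk list of a digit run of length n (greedy chunks of ≤ 4)
def pvChunksC (c : Char) (n : Nat) : List (List Char) :=
  if _h : 0 < n then List.replicate (min n 4) c :: pvChunksC c (n - min n 4) else []
  termination_by n
  decreasing_by omega

-- char-list level description of A's output
def pvOutC : List Char → List (List Char)
  | [] => []
  | c :: rest =>
    if !("0123456789".toList.contains c) then
      [c] :: pvOutC rest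
    else
      pvChunksC c (pvRunA c rest + 1) ++ pvOutC (rest.drop (pvRunA c rest))
  termination_by l => l.length
  decreasing_by all_goals simp [List.length_drop]

-- A's membership test in "0123456789" agrees with B's range test
theorem pv_digit_test (c : Char) :
    ("0123456789".toList.contains c) = decide ('0' ≤ c ∧ c ≤ '9') := by
  have hl : "0123456789".toList = ['0','1','2','3','4','5','6','7','8','9'] := rfl
  rw [hl]
  by_cases hc : '0' ≤ c ∧ c ≤ '9'
  · obtain ⟨h1, h2⟩ := hc
    have h1' : 48 ≤ c.toNat := h1
    have h2' : c.toNat ≤ 57 := h2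
    rw [decide_eq_true (show '0' ≤ c ∧ c ≤ '9' from ⟨h1, h2⟩)]
    have hofn := Char.ofNat_toNat c
    interval_cases h : c.toNat <;> (rw [← hofn]; decide)
  · rw [decide_eq_false hc]
    have hm : c ∉ (['0','1','2','3','4','5','6','7','8','9'] : List Char) := by
      intro hm
      fin_cases hm <;> exact hc ⟨by decide, by decide⟩
    simpa using hm

theorem pv_chunkLoopA_eq (c : Char) : ∀ n, pvChunkLoopA c n = (pvChunksC c n).map String.ofList := by
  intro n
  induction n using Nat.strong_induction_on with
  | _ n ih =>
    rw [pvChunkLoopA, pvChunksC]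
    by_cases h : 0 < n
    · rw [dif_pos h, dif_pos h, List.map_cons, ih (n - min n 4) (by omega)]
    · rw [dif_neg h, dif_neg h]; rfl

-- port A computes the string images of pvOutC
theorem pv_goA_eq_outC : ∀ (n : Nat) (l : List Char), l.length ≤ n →
    pvGoA l = (pvOutC l).map String.ofList := by
  intro n
  induction n with
  | zero =>
    intro l hl
    have : l = [] := List.length_eq_zero_iff.mp (by omega)
    subst this
    simp [pvGoA, pvOutC]
  | succ n ih =>
    intro l hl
    match l with
    | [] => simp [pvGoA, pvOutC]
    | c :: rest =>
      rw [pvGoA, pvOutC]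
      by_cases hd : ("0123456789".toList.contains c) = true
      · simp only [hd, Bool.not_true, Bool.false_eq_true, if_false, Nat.add_sub_cancel,
          List.map_append, pv_chunkLoopA_eq]
        rw [ih _ (by rw [List.length_drop]; simp at hl; omega)]
      · have hnd : ("0123456789".toList.contains c) = false := by
          cases h : ("0123456789".toList.contains c) with
          | true => exact absurd h hd
          | false => rfl
        simp only [hnd, Bool.not_false, if_true, List.map_cons]
        rw [ih _ (by simp at hl; omega)]

-- drop past the takeWhile prefix is dropWhile
theorem pv_drop_takeWhile_len (p : Char → Bool) (l : List Char) :
    l.drop (l.takeWhile p).length = l.dropWhile p := by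
  induction l with
  | nil => rfl
  | cons a t ih =>
    by_cases h : p a = true
    · simp [h, ih]
    · simp [h]

-- "the first char of l cannot merge into the newest group of gs"
def pvSafe (gs : List (List Char)) (l : List Char) : Prop :=
  match l, gs with
  | d :: _, g :: _ => ¬(('0' ≤ d ∧ d ≤ '9') ∧ g.getLast? = some d ∧ g.length < 4)
  | _, _ => True

theorem pv_getLast?_replicate (c : Char) (r : Nat) (hr : 1 ≤ r) :
    (List.replicate r c).getLast? = some c := by
  induction r with
  | zero => omega
  | succ r ih =>
    by_cases h : r = 0
    · subst h; rfl
    · rw [List.replicate_succ, List.getLast?_cons, ih (by omega)]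
      cases hrep : (List.replicate r c : List Char) with
      | nil => exact absurd (by simpa using congrArg List.length hrep) h
      | cons a t =>
        rw [hrep] at ih
        simp

-- every chunk of a digit run ends with the run's digit
theorem pv_chunksC_last (c : Char) : ∀ n g, g ∈ pvChunksC c n → g.getLast? = some c := by
  intro n
  induction n using Nat.strong_induction_on with
  | _ n ih =>
    intro g hg
    rw [pvChunksC] at hg
    by_cases h : 0 < n
    · rw [dif_pos h] at hg
      rcases List.mem_cons.mp hg with h1 | h2
      · subst h1; exact pv_getLast?_replicate c _ (by omega)
      · exact ih (n - min n 4) (by omega) g h2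
    · rw [dif_neg h] at hg; simp at hg

theorem pv_chunksC_ne_nil (c : Char) (n : Nat) (h : 0 < n) : pvChunksC c n ≠ [] := by
  rw [pvChunksC, dif_pos h]; simp

-- B's loop filling the current chunk of j copies of digit c with m more copies
theorem pv_fill (c : Char) (hc : ('0' ≤ c ∧ c ≤ '9')) :
    ∀ (m j : Nat) (gs : List (List Char)), 1 ≤ j → j ≤ 4 →
      List.foldl pvStepB (List.replicate j c :: gs) (List.replicate m c) =
        (pvChunksC c (j + m)).reverse ++ gs := by
  intro m
  induction m with
  | zero =>
    intro j gs h1 h4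
    have hj : pvChunksC c (j + 0) = [List.replicate j c] := by
      rw [pvChunksC, dif_pos (by omega : 0 < j + 0),
        show min (j + 0) 4 = j from by omega,
        show j + 0 - j = 0 from by omega,
        pvChunksC, dif_neg (by omega : ¬ 0 < 0)]
    rw [hj]
    simp
  | succ m ih =>
    intro j gs h1 h4
    rw [List.replicate_succ, List.foldl_cons]
    by_cases hj : j < 4
    · have hstep : pvStepB (List.replicate j c :: gs) c = List.replicate (j + 1) c :: gs := by
        rw [pvStepB, if_pos]
        · rw [← List.replicate_succ']
        · simp [decide_eq_true hc, pv_getLast?_replicate c j h1, hj]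
      rw [hstep, show j + (m + 1) = (j + 1) + m from by omega]
      exact ih (j + 1) gs (by omega) (by omega)
    · have hj4 : j = 4 := by omega
      subst hj4
      have hstep : pvStepB (List.replicate 4 c :: gs) c = [c] :: List.replicate 4 c :: gs := by
        rw [pvStepB, if_neg]
        simp
      rw [hstep, show ([c] : List Char) = List.replicate 1 c from rfl,
        ih 1 (List.replicate 4 c :: gs) (by omega) (by omega)]
      have hch : pvChunksC c (4 + (m + 1)) = List.replicate 4 c :: pvChunksC c (1 + m) := by
        rw [pvChunksC, dif_pos (by omega : 0 < 4 + (m + 1)),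
          show min (4 + (m + 1)) 4 = 4 from by omega,
          show 4 + (m + 1) - 4 = 1 + m from by omega]
      rw [hch, List.reverse_cons, List.append_assoc]
      rfl

-- B's loop over a whole digit run starting with a closed newest group
theorem pv_run_digit (c : Char) (hc : ('0' ≤ c ∧ c ≤ '9')) (n : Nat) (hn : 1 ≤ n)
    (gs : List (List Char)) (hs : pvSafe gs (List.replicate n c)) :
    List.foldl pvStepB gs (List.replicate n c) = (pvChunksC c n).reverse ++ gs := by
  have hrep : (List.replicate n c : List Char) = c :: List.replicate (n - 1) c := by
    cases n with
    | zero => omega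
    | succ k => rw [List.replicate_succ]; rfl
  rw [hrep, List.foldl_cons]
  have hstep : pvStepB gs c = [c] :: gs := by
    cases gs with
    | nil => rfl
    | cons g t =>
      rw [pvStepB, if_neg]
      intro habs
      simp only [Bool.and_eq_true, beq_iff_eq, decide_eq_true_eq] at habs
      obtain ⟨⟨hdg, hlast⟩, hlen⟩ := habs
      rw [hrep] at hs
      exact hs ⟨hc, hlast, hlen⟩
  rw [hstep, show ([c] : List Char) = List.replicate 1 c from rfl,
    pv_fill c hc (n - 1) 1 gs (by omega) (by omega),
    show 1 + (n - 1) = n from by omega]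

-- B's loop over a non-digit char always opens a fresh group
theorem pv_step_nondigit (c : Char) (hc : ¬('0' ≤ c ∧ c ≤ '9')) (gs : List (List Char)) :
    pvStepB gs c = [c] :: gs := by
  cases gs with
  | nil => rfl
  | cons g t =>
    rw [pvStepB, if_neg]
    simp [decide_eq_false hc]

-- the main invariant: B's fold produces pvOutC reversed on top of any closed accumulator
theorem pv_fold_eq_outC : ∀ (n : Nat) (l : List Char), l.length ≤ n →
    ∀ gs, pvSafe gs l → List.foldl pvStepB gs l = (pvOutC l).reverse ++ gs := by
  intro n
  induction n with
  | zero =>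
    intro l hl gs _
    have : l = [] := List.length_eq_zero_iff.mp (by omega)
    subst this
    simp [pvOutC]
  | succ n ih =>
    intro l hl gs hs
    match l with
    | [] => simp [pvOutC]
    | c :: rest =>
      by_cases hd : ("0123456789".toList.contains c) = true
      · -- digit run
        have hc : ('0' ≤ c ∧ c ≤ '9') := by
          have := pv_digit_test c
          rw [hd] at this
          exact of_decide_eq_true this.symm
        set k := (rest.takeWhile (· == c)).length with hk
        have hkle : k ≤ rest.length := (List.takeWhile_prefix _).length_le
        have hrunA : pvRunA c rest = k := by
          rw [hk]
          clear hk hkle hs hl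
          induction rest with
          | nil => rfl
          | cons a t iht =>
            by_cases h : (a == c) = true
            · simp only [pvRunA, List.takeWhile_cons, h, if_true, List.length_cons, iht]
            · simp only [pvRunA, List.takeWhile_cons, h]
              rw [if_neg (by simp [h])]
              rfl
        have htw : rest.takeWhile (· == c) = List.replicate k c := by
          rw [hk, List.eq_replicate_iff]
          refine ⟨rfl, ?_⟩
          intro b hb
          simpa using List.mem_takeWhile_imp hb
        have hdropW : rest.drop k = rest.dropWhile (· == c) := by
          rw [hk]
          exact pv_drop_takeWhile_len _ rest
        have hsplit : (c :: rest : List Char) =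
            List.replicate (k + 1) c ++ rest.drop k := by
          have hpre : rest.takeWhile (· == c) <+: rest := List.takeWhile_prefix _
          have htake : rest.takeWhile (· == c) = rest.take k :=
            by rw [List.prefix_iff_eq_take.mp hpre, hk]
          conv_lhs => rw [← List.take_append_drop k rest, ← htake, htw]
          rw [List.replicate_succ, List.cons_append]
        have hsafe1 : pvSafe gs (List.replicate (k + 1) c) := by
          have hrep : (List.replicate (k + 1) c : List Char) = c :: List.replicate k c := by
            rw [List.replicate_succ]
          rw [hrep]
          cases gs with
          | nil => trivial
          | cons g t => exact hs
        have hsafe2 : pvSafe ((pvChunksC c (k + 1)).reverse ++ gs) (rest.drop k) := by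
          cases hdrop : rest.drop k with
          | nil => trivial
          | cons d t =>
            have hdc : (d == c) = false := by
              have h1 := List.head?_dropWhile_not (· == c) rest
              rw [← hdropW, hdrop] at h1
              simpa using h1
            have hne := pv_chunksC_ne_nil c (k + 1) (by omega)
            cases hrev : (pvChunksC c (k + 1)).reverse with
            | nil => exact absurd (by simpa using hrev) hne
            | cons g0 gt =>
              have hg0 : g0 ∈ pvChunksC c (k + 1) := by
                have : g0 ∈ (pvChunksC c (k + 1)).reverse := by rw [hrev]; simp
                simpa using this
              have hlastc := pv_chunksC_last c (k + 1) g0 hg0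
              intro habs
              obtain ⟨_, hlast, _⟩ := habs
              rw [hlastc] at hlast
              have hcd : c = d := by simpa using hlast
              subst hcd
              simp at hdc
        conv_lhs => rw [hsplit]
        rw [List.foldl_append, pv_run_digit c hc (k + 1) (by omega) gs hsafe1,
          ih (rest.drop k) (by rw [List.length_drop]; simp at hl; omega) _ hsafe2,
          pvOutC]
        simp only [hd, Bool.not_true, Bool.false_eq_true, if_false, hrunA,
          List.reverse_append, List.append_assoc]
      · -- non-digit char
        have hnd : ("0123456789".toList.contains c) = false := by
          cases h : ("0123456789".toList.contains c) with
          | true => exact absurd h hd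
          | false => rfl
        have hc : ¬('0' ≤ c ∧ c ≤ '9') := by
          have := pv_digit_test c
          rw [hnd] at this
          exact of_decide_eq_false this.symm
        have hsafe : pvSafe ([c] :: gs) rest := by
          cases rest with
          | nil => trivial
          | cons d t =>
            intro ⟨hd', hlast, _⟩
            apply hc
            have : c = d := by simpa using hlast
            rw [this]
            exact hd'
        rw [List.foldl_cons, pv_step_nondigit c hc gs,
          ih rest (by simp at hl; omega) _ hsafe, pvOutC]
        simp only [hnd, Bool.not_false, if_true, List.reverse_cons, List.append_assoc,
          List.cons_append, List.nil_append]

-- ===== VERDICT (by name: the statement is the Claim_ definition above) =====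
theorem split_greedy_fallback_py_spec : Claim_equal_split_greedy_fallback_py := by
  intro text _
  unfold Spec_split_greedy_fallback_py split_greedy_fallback_py split_greedy_fallback_py_alt
  rw [pv_fold_eq_outC text.toList.length text.toList le_rfl [] (by cases text.toList <;> trivial)]
  rw [List.append_nil, List.reverse_reverse]
  exact pv_goA_eq_outC text.toList.length text.toList le_rfl
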